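-- pv_equiv track=rewrite | github.com/JuanFerTgB/VRPTW-problem-using-Local-Search-Metaheuristic-Optimization | Genetics_algorith_with_local_search.py | get_best_solution
-- ===== SOURCE A (Python) =====
-- def get_best_solution(population, fitness_values):
--     """
--     Devuelve la mejor solución de la población, priorizando primero el menor fitness (distancia total) y,
--     en caso de empate, el menor número de rutas.
--     """
--     # Validaciones
--     if not population or not fitness_values or len(population) != len(fitness_values):
--         raise ValueError("La población y los valores de fitness deben ser listas no vacías de igual longitud.")
--
--     # Encontrar el mínimo valor de fitness
--     min_fitness = min(fitness_values)
--     # Indices de individuos con el mínimo fitness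
--     best_indices = [i for i, fitness in enumerate(fitness_values) if fitness == min_fitness]
--
--     if len(best_indices) == 1:
--         # Solo hay un individuo con el mejor fitness
--         best_idx = best_indices[0]
--     else:
--         # Si hay múltiples soluciones óptimas en términos de fitness, considerar el número de rutas
--         min_routes = min(len(population[i]) for i in best_indices)
--         # Indices de individuos con el menor número de rutas entre los mejores fitness
--         candidates = [i for i in best_indices if len(population[i]) == min_routes]
--
--         if len(candidates) == 1:
--             # Solo hay un individuo con el mejor fitness y menor número de rutas
--             best_idx = candidates[0]
--         else:
--             # Si aún hay empate, seleccionamos el primer candidato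
--             best_idx = candidates[0]
--
--     return population[best_idx]
-- ===== SOURCE B (Python) =====
-- def get_best_solution(population, fitness_values):
--     """
--     Devuelve la mejor solución de la población, priorizando primero el menor fitness (distancia total) y,
--     en caso de empate, el menor número de rutas.
--     """
--     if not population or not fitness_values or len(population) != len(fitness_values):
--         raise ValueError("La población y los valores de fitness deben ser listas no vacías de igual longitud.")
--     best_idx = min(range(len(population)),
--                    key=lambda i: (fitness_values[i], len(population[i])))
--     return population[best_idx]
-- ===== Notes on version B (the rewrite author's own statement) =====
-- stated objective: simpler
-- what changed: Replaces the staged min/filter/min/filter chain and its singleton special-cases with one keyed min over the index range using a lexicographic (fitness, route-count) key; min's first-minimum semantics reproduce A's first-candidate tie-break.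
import Mathlib
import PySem

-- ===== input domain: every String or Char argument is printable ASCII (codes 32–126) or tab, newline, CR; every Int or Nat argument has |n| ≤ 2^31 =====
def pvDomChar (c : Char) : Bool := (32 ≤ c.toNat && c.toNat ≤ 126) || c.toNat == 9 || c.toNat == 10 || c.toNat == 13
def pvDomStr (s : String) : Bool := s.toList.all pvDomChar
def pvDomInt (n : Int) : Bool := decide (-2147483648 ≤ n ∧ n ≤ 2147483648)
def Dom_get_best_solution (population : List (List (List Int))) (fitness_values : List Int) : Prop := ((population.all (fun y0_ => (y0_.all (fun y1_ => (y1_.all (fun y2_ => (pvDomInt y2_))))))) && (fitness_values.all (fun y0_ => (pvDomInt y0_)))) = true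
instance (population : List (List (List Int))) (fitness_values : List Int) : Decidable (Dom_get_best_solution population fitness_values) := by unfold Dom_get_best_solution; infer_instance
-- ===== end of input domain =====

-- B replaces A's staged min/filter/min/filter selection with a single keyed minimum over the
-- index range using a lexicographic (fitness, route-count) key (simpler decomposition, same cost).


-- ===== PORT A =====
-- helper for A's comprehension: [i for i, fitness in enumerate(fitness_values) if fitness == min_fitness]
def pvBestIndices (fitness_values : List Int) (min_fitness : Int) : List Int :=
  ((PySem.List.enumerate fitness_values 0).filter (fun p => p.2 == min_fitness)).map (fun p => p.1)

def get_best_solution (population : List (List (List Int))) (fitness_values : List Int) : List (List Int) :=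
  -- 'raise ValueError' on empty/mismatched inputs: excluded by Pre_
  if population = [] ∨ fitness_values = [] ∨ PySem.List.len population ≠ PySem.List.len fitness_values then []
  else
    match PySem.List.min? fitness_values (fun x => x) with
    | none => []   -- unreachable inside Pre_ (fitness_values ≠ [])
    | some min_fitness =>
      if (pvBestIndices fitness_values min_fitness).length == 1 then
        PySem.List.pyGetD population ((pvBestIndices fitness_values min_fitness).headD 0) []
      else
        match PySem.List.min? ((pvBestIndices fitness_values min_fitness).map (fun i => PySem.List.len (PySem.List.pyGetD population i []))) (fun x => x) with
        | none => []   -- unreachable: best_indices is nonempty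
        | some min_routes =>
          PySem.List.pyGetD population
            (((pvBestIndices fitness_values min_fitness).filter
                (fun i => PySem.List.len (PySem.List.pyGetD population i []) == min_routes)).headD 0) []

-- ===== PORT B =====
def get_best_solution_alt (population : List (List (List Int))) (fitness_values : List Int) : List (List Int) :=
  if population = [] ∨ fitness_values = [] ∨ PySem.List.len population ≠ PySem.List.len fitness_values then []
  else
    match PySem.List.min2? (PySem.List.pyRange 0 (PySem.List.len population) 1)
        (fun i => PySem.List.pyGetD fitness_values i 0)
        (fun i => PySem.List.len (PySem.List.pyGetD population i [])) with
    | none => []   -- unreachable inside Pre_ (population ≠ [])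
    | some best_idx => PySem.List.pyGetD population best_idx []

-- ===== PRECONDITION & SPEC =====
-- Pre_ excludes exactly the inputs on which A raises ValueError: empty lists or mismatched lengths.
def Pre_get_best_solution (population : List (List (List Int))) (fitness_values : List Int) : Prop :=
  population ≠ [] ∧ fitness_values ≠ [] ∧ population.length = fitness_values.length
instance (population : List (List (List Int))) (fitness_values : List Int) : Decidable (Pre_get_best_solution population fitness_values) := by unfold Pre_get_best_solution; infer_instance
def pvWitness_get_best_solution : List (List (List Int)) × List Int := ([[[1, 2]], [[3]]], [5, 4])

def Spec_get_best_solution (population : List (List (List Int))) (fitness_values : List Int) (out : List (List Int)) : Prop := out = get_best_solution_alt population fitness_values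
instance (population : List (List (List Int))) (fitness_values : List Int) (out : List (List Int)) : Decidable (Spec_get_best_solution population fitness_values out) := by unfold Spec_get_best_solution; infer_instance

-- ===== CLAIM (what is proved, stated in full; the proofs are below) =====
def Claim_equal_get_best_solution : Prop := ∀ (population : List (List (List Int))) (fitness_values : List Int), Dom_get_best_solution population fitness_values → Pre_get_best_solution population fitness_values → Spec_get_best_solution population fitness_values (get_best_solution population fitness_values)

-- ===== LEMMAS AND PROOFS =====

-- lexicographic strict / non-strict comparison of the (fitness, routes) key of two indices
def pvLt (f g : Int → Int) (x m : Int) : Prop := f x < f m ∨ (f x = f m ∧ g x < g m)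
def pvLe (f g : Int → Int) (x m : Int) : Prop := f x < f m ∨ (f x = f m ∧ g x ≤ g m)

-- m is the FIRST lexicographic minimizer of (f, g) in l
def IsFirstMin (f g : Int → Int) (l : List Int) (m : Int) : Prop :=
  ∃ p s, l = p ++ m :: s ∧ (∀ x ∈ p, pvLt f g m x) ∧ (∀ x ∈ s, pvLe f g m x)

theorem isFirstMin_unique_aux (f g : Int → Int) (p : List Int) :
    ∀ (p' s s' : List Int) (m m' : Int), p ++ m :: s = p' ++ m' :: s' →
      (∀ x ∈ p, pvLt f g m x) → (∀ x ∈ s, pvLe f g m x) →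
      (∀ x ∈ p', pvLt f g m' x) → (∀ x ∈ s', pvLe f g m' x) → m = m' := by
  induction p with
  | nil =>
    intro p' s s' m m' heq _ hs hp' hs'
    cases p' with
    | nil =>
      simp only [List.nil_append] at heq
      exact (List.cons_eq_cons.mp heq).1
    | cons y pt' =>
      simp only [List.nil_append, List.cons_append] at heq
      injection heq with h1 h2
      exfalso
      have ha : pvLt f g m' m := hp' _ (by rw [← h1]; exact List.mem_cons_self ..)
      have hb : pvLe f g m m' := hs _ (by rw [h2]; exact List.mem_append_right _ (List.mem_cons_self ..))
      unfold pvLt at ha; unfold pvLe at hb; omega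
  | cons x pt ih =>
    intro p' s s' m m' heq hp hs hp' hs'
    cases p' with
    | nil =>
      simp only [List.nil_append, List.cons_append] at heq
      injection heq with h1 h2
      exfalso
      have ha : pvLt f g m x := hp _ (List.mem_cons_self ..)
      have hb : pvLe f g m' m := hs' _ (by rw [← h2]; exact List.mem_append_right _ (List.mem_cons_self ..))
      rw [h1] at ha
      unfold pvLt at ha; unfold pvLe at hb; omega
    | cons y pt' =>
      simp only [List.cons_append] at heq
      injection heq with h1 h2
      exact ih pt' s s' m m' h2 (fun z hz => hp z (List.mem_cons_of_mem _ hz)) hs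
        (fun z hz => hp' z (List.mem_cons_of_mem _ hz)) hs'

theorem isFirstMin_unique (f g : Int → Int) (l : List Int) (m m' : Int)
    (h1 : IsFirstMin f g l m) (h2 : IsFirstMin f g l m') : m = m' := by
  obtain ⟨p, s, hl, hp, hs⟩ := h1
  obtain ⟨p', s', hl', hp', hs'⟩ := h2
  exact isFirstMin_unique_aux f g p p' s s' m m' (hl.symm.trans hl') hp hs hp' hs'

-- the running-minimum fold (the body of min2?) applied to the tail, seeded with the head
def pvFold (f g : Int → Int) (t : List Int) (m : Int) : Int :=
  t.foldl (fun m x => if (decide (f x < f m) || (!decide (f m < f x) && decide (g x < g m))) = true then x else m) m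

theorem pvFold_cons (f g : Int → Int) (x : Int) (t : List Int) (m : Int) :
    pvFold f g (x :: t) m
      = pvFold f g t (if (decide (f x < f m) || (!decide (f m < f x) && decide (g x < g m))) = true then x else m) := rfl

theorem isFirstMin_pvFold (f g : Int → Int) (t : List Int) :
    ∀ m : Int, IsFirstMin f g (m :: t) (pvFold f g t m) := by
  induction t with
  | nil => exact fun m => ⟨[], [], rfl, by simp, by simp⟩
  | cons x t' ih =>
    intro m
    by_cases hc : (decide (f x < f m) || (!decide (f m < f x) && decide (g x < g m))) = true
    · have hxm : pvLt f g x m := by unfold pvLt; simp at hc; omega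
      rw [pvFold_cons, if_pos hc]
      obtain ⟨p, s, hl, hp, hs⟩ := ih x
      have hrx : pvLe f g (pvFold f g t' x) x := by
        rcases p with _ | ⟨w, pw⟩
        · simp only [List.nil_append] at hl
          injection hl with h1 _
          rw [← h1]; unfold pvLe; omega
        · simp only [List.cons_append] at hl
          injection hl with h1 _
          have hw := hp w (List.mem_cons_self ..)
          rw [← h1] at hw
          unfold pvLt at hw; unfold pvLe; omega
      refine ⟨m :: p, s, by rw [List.cons_append, ← hl], ?_, hs⟩
      intro z hz
      rcases List.mem_cons.mp hz with h | h
      · rw [h]; unfold pvLt at hxm ⊢; unfold pvLe at hrx; omega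
      · exact hp z h
    · have hmx : pvLe f g m x := by unfold pvLe; simp at hc; omega
      rw [pvFold_cons, if_neg hc]
      obtain ⟨p, s, hl, hp, hs⟩ := ih m
      rcases p with _ | ⟨w, pw⟩
      · simp only [List.nil_append] at hl
        injection hl with h1 h2
        refine ⟨[], x :: t', by rw [← h1]; rfl, ?_, ?_⟩
        · simp
        · intro z hz
          rcases List.mem_cons.mp hz with h | h
          · rw [h, ← h1]; exact hmx
          · rw [h2] at h; exact hs z h
      · simp only [List.cons_append] at hl
        injection hl with h1 h2
        have hrm : pvLt f g (pvFold f g t' m) m := by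
          have hw := hp w (List.mem_cons_self ..); rw [← h1] at hw; exact hw
        refine ⟨m :: x :: pw, s, by simp only [List.cons_append]; rw [← h2], ?_, hs⟩
        intro z hz
        rcases List.mem_cons.mp hz with h | h
        · rw [h]; exact hrm
        · rcases List.mem_cons.mp h with h3 | h3
          · rw [h3]; unfold pvLt at hrm ⊢; unfold pvLe at hmx; omega
          · exact hp z (List.mem_cons_of_mem _ h3)

theorem pvFoldl_some (u : Int → Int → Int) (step : Option Int → Int → Option Int)
    (h : ∀ m x, step (some m) x = some (u m x)) :
    ∀ (t : List Int) (m : Int), List.foldl step (some m) t = some (t.foldl u m) := by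
  intro t
  induction t with
  | nil => intro m; rfl
  | cons x t ih => intro m; rw [List.foldl_cons, h, List.foldl_cons]; exact ih (u m x)

-- min2? on a nonempty list is the seeded running-minimum fold
theorem min2?_cons (f g : Int → Int) (a : Int) (t : List Int) :
    PySem.List.min2? (a :: t) f g = some (pvFold f g t a) := by
  unfold PySem.List.min2? pvFold
  rw [List.foldl_cons]
  exact pvFoldl_some _ _ (fun m x => (apply_ite some _ _ _).symm) t a

-- A's index list is the filtered index range
theorem pvBestIndices_eq (fitness_values : List Int) (mf : Int) :
    pvBestIndices fitness_values mf
      = (PySem.List.pyRange 0 (PySem.List.len fitness_values) 1).filter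
          (fun j => PySem.List.pyGetD fitness_values j 0 == mf) := by
  unfold pvBestIndices
  rw [PySem.List.enumerate_eq_map_pyRange fitness_values 0]
  simp [List.filter_map, Function.comp_def]

-- a first-lex-minimizer of the index range, built from pointwise bounds
theorem build_firstmin (f g : Int → Int) (n m : Int) (h0 : 0 ≤ m) (h1 : m < n)
    (hle : ∀ x, 0 ≤ x → x < n → pvLe f g m x)
    (hlt : ∀ x, 0 ≤ x → x < m → pvLt f g m x) :
    IsFirstMin f g (PySem.List.pyRange 0 n 1) m := by
  refine ⟨PySem.List.pyRange 0 m 1, PySem.List.pyRange (m + 1) n 1, ?_, ?_, ?_⟩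
  · rw [PySem.List.pyRange_one_append 0 m n h0 (le_of_lt h1), PySem.List.pyRange_one_cons h1]
  · intro x hx
    rw [PySem.List.mem_pyRange_one] at hx
    exact hlt x hx.1 hx.2
  · intro x hx
    rw [PySem.List.mem_pyRange_one] at hx
    exact hle x (by omega) hx.2

theorem get_best_solution_spec : Claim_equal_get_best_solution := by
  intro pop fv _ hpre
  obtain ⟨hp0, hf0, hlen⟩ := hpre
  unfold Spec_get_best_solution
  have hg : ¬ (pop = [] ∨ fv = [] ∨ PySem.List.len pop ≠ PySem.List.len fv) := by
    simp [PySem.List.len_eq, hp0, hf0, hlen]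
  set n : Int := PySem.List.len fv with hn
  have hn' : n = (fv.length : Int) := by rw [hn, PySem.List.len_eq]
  have hN : PySem.List.len pop = n := by rw [hn]; simp [PySem.List.len_eq, hlen]
  have hnpos : 0 < n := by rw [hn']; exact_mod_cast List.length_pos_of_ne_nil hf0
  -- membership in fv for in-range indices
  have hmemfv : ∀ x : Int, 0 ≤ x → x < n → PySem.List.pyGetD fv x 0 ∈ fv := by
    intro x h0 h1
    rw [PySem.List.pyGetD_eq_getElem fv 0 h0 (by rw [hn'] at h1; exact_mod_cast h1)]
    exact List.getElem_mem _
  -- fitness_values is nonempty, so min? returns some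
  rcases hmf : PySem.List.min? fv (fun x => x) with _ | mf
  · exact absurd ((PySem.List.min?_eq_none_iff _ _).mp hmf) hf0
  have hminf : ∀ x : Int, 0 ≤ x → x < n → mf ≤ PySem.List.pyGetD fv x 0 :=
    fun x h0 h1 => PySem.List.min?_isMin hmf _ (hmemfv x h0 h1)
  -- membership characterisation of best_indices
  have hmem : ∀ j : Int, j ∈ pvBestIndices fv mf ↔ (0 ≤ j ∧ j < n ∧ PySem.List.pyGetD fv j 0 = mf) := by
    intro j
    rw [pvBestIndices_eq, List.mem_filter, PySem.List.mem_pyRange_one]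
    simp [← hn', and_assoc]
  have hpw : (pvBestIndices fv mf).Pairwise (· < ·) := by
    rw [pvBestIndices_eq]
    exact (PySem.List.pairwise_lt_pyRange_one 0 _).filter _
  -- best_indices is nonempty
  have hbne : pvBestIndices fv mf ≠ [] := by
    have hmm : mf ∈ fv := PySem.List.min?_mem hmf
    obtain ⟨k, hk, hfk⟩ := List.mem_iff_getElem.mp hmm
    refine List.ne_nil_of_mem ((hmem (k : Int)).mpr ⟨by exact_mod_cast Nat.zero_le k, ?_, ?_⟩)
    · rw [hn']; exact_mod_cast hk
    · rw [PySem.List.pyGetD_eq_getElem fv 0 (by exact_mod_cast Nat.zero_le k)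
        (by exact_mod_cast hk)]
      simpa using hfk
  -- B's side: the first lexicographic minimizer over the index range
  have hcons : PySem.List.pyRange 0 n 1 = 0 :: PySem.List.pyRange 1 n 1 := by
    rw [PySem.List.pyRange_one_cons hnpos]; norm_num
  have hBval : get_best_solution_alt pop fv
      = PySem.List.pyGetD pop (pvFold (fun i => PySem.List.pyGetD fv i 0)
          (fun i => PySem.List.len (PySem.List.pyGetD pop i [])) (PySem.List.pyRange 1 n 1) 0) [] := by
    unfold get_best_solution_alt
    rw [if_neg hg, hN, hcons, min2?_cons]
  have hBfm : IsFirstMin (fun i => PySem.List.pyGetD fv i 0)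
      (fun i => PySem.List.len (PySem.List.pyGetD pop i [])) (PySem.List.pyRange 0 n 1)
      (pvFold (fun i => PySem.List.pyGetD fv i 0)
        (fun i => PySem.List.len (PySem.List.pyGetD pop i [])) (PySem.List.pyRange 1 n 1) 0) := by
    rw [hcons]; exact isFirstMin_pvFold _ _ _ 0
  rw [hBval]
  -- A's side
  unfold get_best_solution
  rw [if_neg hg]
  simp only [hmf]
  by_cases hb1 : ((pvBestIndices fv mf).length == 1) = true
  · -- exactly one best-fitness individual
    rw [if_pos hb1]
    obtain ⟨i, hbi⟩ := List.length_eq_one_iff.mp (by simpa using hb1)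
    have hi : 0 ≤ i ∧ i < n ∧ PySem.List.pyGetD fv i 0 = mf :=
      (hmem i).mp (by rw [hbi]; exact List.mem_cons_self ..)
    have hA : IsFirstMin (fun i => PySem.List.pyGetD fv i 0)
        (fun i => PySem.List.len (PySem.List.pyGetD pop i [])) (PySem.List.pyRange 0 n 1) i := by
      refine build_firstmin _ _ n i hi.1 hi.2.1 ?_ ?_
      · intro x h0 h1
        by_cases hfx : PySem.List.pyGetD fv x 0 = mf
        · have hxi : x = i := by
            have hx := (hmem x).mpr ⟨h0, h1, hfx⟩
            rw [hbi] at hx; simpa using hx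
          rw [hxi]; unfold pvLe; omega
        · have := hminf x h0 h1
          unfold pvLe; simp only []
          omega
      · intro x h0 h1
        by_cases hfx : PySem.List.pyGetD fv x 0 = mf
        · exfalso
          have hx := (hmem x).mpr ⟨h0, by omega, hfx⟩
          rw [hbi] at hx
          have : x = i := by simpa using hx
          omega
        · have := hminf x h0 (by omega)
          unfold pvLt; simp only []
          omega
    rw [hbi]
    simp only [List.headD_cons]
    rw [isFirstMin_unique _ _ _ i _ hA hBfm]
  · rw [if_neg hb1]
    -- min over route counts of the best-fitness individuals
    rcases hmr : PySem.List.min? ((pvBestIndices fv mf).map (fun i => PySem.List.len (PySem.List.pyGetD pop i []))) (fun x => x) with _ | mr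
    · rw [PySem.List.min?_eq_none_iff, List.map_eq_nil_iff] at hmr
      exact absurd hmr hbne
    simp only [hmr]
    have hminr : ∀ i ∈ pvBestIndices fv mf, mr ≤ PySem.List.len (PySem.List.pyGetD pop i []) := by
      intro i hi
      exact PySem.List.min?_isMin hmr _ (List.mem_map_of_mem hi)
    -- candidates is nonempty
    have hcne : ∃ i ∈ pvBestIndices fv mf, PySem.List.len (PySem.List.pyGetD pop i []) = mr := by
      obtain ⟨i, hi, hgi⟩ := List.mem_map.mp (PySem.List.min?_mem hmr)
      exact ⟨i, hi, hgi⟩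
    rcases hcEq : (pvBestIndices fv mf).filter (fun i => PySem.List.len (PySem.List.pyGetD pop i []) == mr) with _ | ⟨c, rest⟩
    · exfalso
      obtain ⟨i, hi, hgi⟩ := hcne
      have hic : i ∈ (pvBestIndices fv mf).filter (fun i => PySem.List.len (PySem.List.pyGetD pop i []) == mr) :=
        List.mem_filter.mpr ⟨hi, by simpa using hgi⟩
      rw [hcEq] at hic; simp at hic
    · have hcmem : c ∈ pvBestIndices fv mf ∧ PySem.List.len (PySem.List.pyGetD pop c []) = mr := by
        have hcc : c ∈ (pvBestIndices fv mf).filter (fun i => PySem.List.len (PySem.List.pyGetD pop i []) == mr) := by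
          rw [hcEq]; exact List.mem_cons_self ..
        obtain ⟨h1, h2⟩ := List.mem_filter.mp hcc
        exact ⟨h1, by simpa using h2⟩
      obtain ⟨hc1, hc2, hc3⟩ := (hmem c).mp hcmem.1
      have hcleast : ∀ x, x ∈ pvBestIndices fv mf → PySem.List.len (PySem.List.pyGetD pop x []) = mr → c ≤ x := by
        intro x hx hgx
        have hxc : x ∈ c :: rest := by
          rw [← hcEq]
          exact List.mem_filter.mpr ⟨hx, by simpa using hgx⟩
        rcases List.mem_cons.mp hxc with h | h
        · omega
        · have hpc : (c :: rest).Pairwise (· < ·) := by rw [← hcEq]; exact hpw.filter _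
          exact le_of_lt ((List.pairwise_cons.mp hpc).1 x h)
      have hA : IsFirstMin (fun i => PySem.List.pyGetD fv i 0)
          (fun i => PySem.List.len (PySem.List.pyGetD pop i [])) (PySem.List.pyRange 0 n 1) c := by
        refine build_firstmin _ _ n c hc1 hc2 ?_ ?_
        · intro x h0 h1
          by_cases hfx : PySem.List.pyGetD fv x 0 = mf
          · have hxbi := (hmem x).mpr ⟨h0, h1, hfx⟩
            have := hminr x hxbi
            unfold pvLe; simp only []
            omega
          · have := hminf x h0 h1
            unfold pvLe; simp only []
            omega
        · intro x h0 h1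
          by_cases hfx : PySem.List.pyGetD fv x 0 = mf
          · have hxbi := (hmem x).mpr ⟨h0, by omega, hfx⟩
            have hge := hminr x hxbi
            by_cases hgx : PySem.List.len (PySem.List.pyGetD pop x []) = mr
            · exfalso; have := hcleast x hxbi hgx; omega
            · unfold pvLt; simp only []
              omega
          · have := hminf x h0 (by omega)
            unfold pvLt; simp only []
            omega
      simp only [List.headD_cons]
      rw [isFirstMin_unique _ _ _ c _ hA hBfm]
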